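-- pv_equiv track=rewrite | github.com/vehicle-back/Early_Detection | data_processing/speed_processing/utils.py | compute_upstream
-- ===== SOURCE A (Python) =====
-- def compute_upstream(source, dict_prev, dict_upstream):
--     if source not in dict_prev:
--         # if source does not have immediate previous neighbor segment
--         return [[]]
--     if source in dict_upstream:
--         return dict_upstream[source]
--     else:
--         # if source does have one or more immediate previous neighbor segment
--         result = []
--
--         # for each immediate previous neighbor p, compute the upstream of p, and prepend source into each of the upstream path
--         for p in dict_prev[source]:
--             prev_result = compute_upstream(p, dict_prev, dict_upstream)
--             for r in prev_result:
--                 result.append([p]+r)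
--         return result
-- ===== SOURCE B (Python) =====
-- def compute_upstream(source, dict_prev, dict_upstream):
--     # Memoized DP: each node's upstream path list is computed once and cached.
--     memo = {}
--
--     def paths(n):
--         if n in memo:
--             return memo[n]
--         if n not in dict_prev:
--             res = [[]]
--         elif n in dict_upstream:
--             res = dict_upstream[n]
--         else:
--             res = [[p] + r for p in dict_prev[n] for r in paths(p)]
--         memo[n] = res
--         return res
--
--     return paths(source)
-- ===== Notes on version B (the rewrite author's own statement) =====
-- stated objective: alternative
-- what changed: B replaces A's naive recursion, which re-enumerates a node's upstream path list once per parent that reaches it, by a memoized DP (a dict cache filled once per node), so each node's path list is computed a single time.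
import Mathlib
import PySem

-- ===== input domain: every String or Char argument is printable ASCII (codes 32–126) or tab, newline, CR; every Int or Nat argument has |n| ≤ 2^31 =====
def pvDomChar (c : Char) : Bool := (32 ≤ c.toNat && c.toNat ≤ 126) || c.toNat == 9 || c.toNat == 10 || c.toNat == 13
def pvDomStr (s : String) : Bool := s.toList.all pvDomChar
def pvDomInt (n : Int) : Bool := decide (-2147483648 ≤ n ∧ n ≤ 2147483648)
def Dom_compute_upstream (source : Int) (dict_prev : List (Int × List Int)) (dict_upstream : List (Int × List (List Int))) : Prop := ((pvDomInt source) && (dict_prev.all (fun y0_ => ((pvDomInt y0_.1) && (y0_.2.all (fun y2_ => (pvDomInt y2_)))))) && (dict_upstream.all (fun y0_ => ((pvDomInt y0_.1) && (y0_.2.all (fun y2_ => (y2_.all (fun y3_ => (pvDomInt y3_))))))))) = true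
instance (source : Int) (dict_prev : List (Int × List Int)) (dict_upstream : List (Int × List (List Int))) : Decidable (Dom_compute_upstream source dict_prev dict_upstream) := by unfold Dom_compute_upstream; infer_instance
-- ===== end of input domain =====

-- B replaces A's naive recursion (which re-enumerates a node's upstream paths once per
-- parent) by a memoized DP that computes each node's path list once; same return value.

-- ===== PORT A =====
-- A's recursion, with a fuel guard for totality only: under Pre_ (no reachable cycle of
-- expandable nodes) the fuel dict_prev.length + 1 is never exhausted.
def cuA (dp : List (Int × List Int)) (du : List (Int × List (List Int))) : Nat → Int → List (List Int)
  | 0, _ => []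
  | f + 1, n =>
    match (PySem.Dict.mk dp).get? n with
    | none => [[]]                              -- if source not in dict_prev
    | some prevs =>
      match (PySem.Dict.mk du).get? n with
      | some v => v                             -- if source in dict_upstream
      | none =>
        -- result = []; for p in dict_prev[source]: for r in …: result.append([p]+r)
        prevs.foldl (fun result p => result ++ (cuA dp du f p).map (fun r => p :: r)) []

def compute_upstream (source : Int) (dict_prev : List (Int × List Int)) (dict_upstream : List (Int × List (List Int))) : List (List Int) :=
  cuA dict_prev dict_upstream (dict_prev.length + 1) source

-- ===== PORT B =====
-- B's memoized recursion `paths`, threading the memo dict; same fuel guard as A's port.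
mutual
def cuB (dp : List (Int × List Int)) (du : List (Int × List (List Int))) : Nat → Int → PySem.Dict Int (List (List Int)) → (List (List Int)) × PySem.Dict Int (List (List Int))
  | 0, _, memo => ([], memo)
  | f + 1, n, memo =>
    match memo.get? n with
    | some v => (v, memo)                       -- if n in memo
    | none =>
      let (res, memo') :=
        match (PySem.Dict.mk dp).get? n with
        | none => ([[]], memo)                  -- if n not in dict_prev
        | some prevs =>
          match (PySem.Dict.mk du).get? n with
          | some v => (v, memo)                 -- elif n in dict_upstream
          | none => cuBL dp du f prevs memo     -- [[p] + r for p in dict_prev[n] for r in paths(p)]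
      (res, memo'.insert n res)                 -- memo[n] = res

def cuBL (dp : List (Int × List Int)) (du : List (Int × List (List Int))) : Nat → List Int → PySem.Dict Int (List (List Int)) → (List (List Int)) × PySem.Dict Int (List (List Int))
  | _, [], memo => ([], memo)
  | f, p :: rest, memo =>
    let (r, m1) := cuB dp du f p memo
    let (rs, m2) := cuBL dp du f rest m1
    (r.map (fun rr => p :: rr) ++ rs, m2)
end

def compute_upstream_alt (source : Int) (dict_prev : List (Int × List Int)) (dict_upstream : List (Int × List (List Int))) : List (List Int) :=
  (cuB dict_prev dict_upstream (dict_prev.length + 1) source PySem.Dict.empty).1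

-- ===== PRECONDITION & SPEC =====
-- One step of the expansion graph: n expands to dict_prev[n] unless n is absent from
-- dict_prev or present in dict_upstream (where the recursion stops).
def upChildren (dp : List (Int × List Int)) (du : List (Int × List (List Int))) (n : Int) : List Int :=
  match (PySem.Dict.mk dp).get? n with
  | none => []
  | some prevs => if ((PySem.Dict.mk du).get? n).isSome then [] else prevs

def upStep (dp : List (Int × List Int)) (du : List (Int × List (List Int))) (S : List Int) : List Int :=
  S.flatMap (upChildren dp du)

-- Pre_ excludes exactly the inputs where A's recursion never terminates (a cycle of
-- expandable nodes reachable from source, i.e. an expansion chain longer than the number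
-- of dict_prev entries): Python A raises RecursionError there.
def Pre_compute_upstream (source : Int) (dict_prev : List (Int × List Int)) (dict_upstream : List (Int × List (List Int))) : Prop :=
  (upStep dict_prev dict_upstream)^[dict_prev.length + 1] [source] = []

instance (source : Int) (dict_prev : List (Int × List Int)) (dict_upstream : List (Int × List (List Int))) : Decidable (Pre_compute_upstream source dict_prev dict_upstream) := by unfold Pre_compute_upstream; infer_instance

def pvWitness_compute_upstream : Int × (List (Int × List Int)) × (List (Int × List (List Int))) :=
  (0, [(0, [1, 2]), (1, [2])], [(2, [[5], [6, 7]])])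

def Spec_compute_upstream (source : Int) (dict_prev : List (Int × List Int)) (dict_upstream : List (Int × List (List Int))) (out : List (List Int)) : Prop := out = compute_upstream_alt source dict_prev dict_upstream
instance (source : Int) (dict_prev : List (Int × List Int)) (dict_upstream : List (Int × List (List Int))) (out : List (List Int)) : Decidable (Spec_compute_upstream source dict_prev dict_upstream out) := by unfold Spec_compute_upstream; infer_instance

-- ===== CLAIM (what is proved, stated in full; the proofs are below) =====
def Claim_equal_compute_upstream : Prop := ∀ (source : Int) (dict_prev : List (Int × List Int)) (dict_upstream : List (Int × List (List Int))), Dom_compute_upstream source dict_prev dict_upstream → Pre_compute_upstream source dict_prev dict_upstream → Spec_compute_upstream source dict_prev dict_upstream (compute_upstream source dict_prev dict_upstream)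

-- ===== LEMMAS AND PROOFS =====

-- `Safe f n`: no expansion chain of length f starting at n (proof-side abbreviation).
def Safe (dp : List (Int × List Int)) (du : List (Int × List (List Int))) (f : Nat) (n : Int) : Prop :=
  (upStep dp du)^[f] [n] = []

lemma upStep_mono (dp : List (Int × List Int)) (du : List (Int × List (List Int))) :
    ∀ (f : Nat) (S T : List Int), S ⊆ T → (upStep dp du)^[f] S ⊆ (upStep dp du)^[f] T := by
  intro f
  induction f with
  | zero => intro S T h; simpa using h
  | succ f ih =>
    intro S T h
    rw [Function.iterate_succ_apply, Function.iterate_succ_apply]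
    apply ih
    intro x hx
    simp only [upStep, List.mem_flatMap] at hx ⊢
    obtain ⟨n, hn, hc⟩ := hx
    exact ⟨n, h hn, hc⟩

lemma safe_child (dp : List (Int × List Int)) (du : List (Int × List (List Int)))
    (f : Nat) (n p : Int) (h : Safe dp du (f + 1) n)
    (hp : p ∈ upChildren dp du n) : Safe dp du f p := by
  unfold Safe at h ⊢
  rw [Function.iterate_succ_apply] at h
  have hsub : [p] ⊆ upStep dp du [n] := by
    intro x hx
    simp only [List.mem_singleton] at hx
    subst hx
    simp [upStep, hp]
  have := upStep_mono dp du f _ _ hsub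
  rw [h] at this
  exact List.subset_nil.mp this

lemma safe_prev (dp : List (Int × List Int)) (du : List (Int × List (List Int)))
    (f : Nat) (n p : Int) (prevs : List Int)
    (hdp : (PySem.Dict.mk dp).get? n = some prevs)
    (hdu : (PySem.Dict.mk du).get? n = none)
    (h : Safe dp du (f + 1) n) (hp : p ∈ prevs) : Safe dp du f p := by
  apply safe_child dp du f n p h
  simp [upChildren, hdp, hdu, hp]

-- Fuel irrelevance for A's port: with enough fuel the result is stable.
lemma cuA_fuel (dp : List (Int × List Int)) (du : List (Int × List (List Int))) :
    ∀ (f : Nat) (n : Int) (g : Nat), Safe dp du (f + 1) n →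
      cuA dp du (f + 1 + g) n = cuA dp du (f + 1) n := by
  intro f
  induction f with
  | zero =>
    intro n g h
    rw [show 0 + 1 + g = g + 1 from by omega]
    cases hdp : (PySem.Dict.mk dp).get? n with
    | none => simp [cuA, hdp]
    | some prevs =>
      cases hdu : (PySem.Dict.mk du).get? n with
      | some v => simp [cuA, hdp, hdu]
      | none =>
        have hprevs : prevs = [] := by
          unfold Safe at h
          rw [Function.iterate_succ_apply, Function.iterate_zero_apply] at h
          simpa [upStep, upChildren, hdp, hdu] using h
        subst hprevs
        simp [cuA, hdp, hdu]
  | succ f ih =>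
    intro n g h
    rw [show f + 1 + 1 + g = (f + 1 + g) + 1 from by omega]
    cases hdp : (PySem.Dict.mk dp).get? n with
    | none => simp [cuA, hdp]
    | some prevs =>
      cases hdu : (PySem.Dict.mk du).get? n with
      | some v => simp [cuA, hdp, hdu]
      | none =>
        simp only [cuA, hdp, hdu]
        apply PySem.List.foldl_congr_mem
        intro acc p hp
        rw [ih p g (safe_prev dp du (f + 1) n p prevs hdp hdu h hp)]
        rfl

-- The memo invariant: every cached value is the (stable) A-value of its key.
def GoodMemo (dp : List (Int × List Int)) (du : List (Int × List (List Int)))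
    (memo : PySem.Dict Int (List (List Int))) : Prop :=
  ∀ (k : Int) (v : List (List Int)), memo.get? k = some v →
    ∃ f : Nat, Safe dp du (f + 1) k ∧ v = cuA dp du (f + 1) k

lemma goodMemo_insert (dp : List (Int × List Int)) (du : List (Int × List (List Int)))
    (memo : PySem.Dict Int (List (List Int))) (n : Int) (res : List (List Int)) (f : Nat)
    (hg : GoodMemo dp du memo) (hs : Safe dp du (f + 1) n) (hv : res = cuA dp du (f + 1) n) :
    GoodMemo dp du (memo.insert n res) := by
  intro k v hk
  rw [PySem.Dict.get?_insert] at hk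
  split at hk
  · rename_i hkn
    subst hkn
    exact ⟨f, hs, by injection hk with h; rw [← h, hv]⟩
  · exact hg k v hk

lemma memo_value_eq (dp : List (Int × List Int)) (du : List (Int × List (List Int)))
    (f g : Nat) (n : Int) (v : List (List Int))
    (hf : Safe dp du (f + 1) n) (hg : Safe dp du (g + 1) n)
    (hv : v = cuA dp du (g + 1) n) : v = cuA dp du (f + 1) n := by
  have h1 := cuA_fuel dp du f n g hf
  have h2 := cuA_fuel dp du g n f hg
  rw [hv, ← h2, ← h1]
  ring_nf

-- Main invariant: B's memoized recursion returns A's value and preserves the invariant.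
lemma cuB_correct (dp : List (Int × List Int)) (du : List (Int × List (List Int))) :
    ∀ (f : Nat) (n : Int) (memo : PySem.Dict Int (List (List Int))),
      Safe dp du (f + 1) n → GoodMemo dp du memo →
      (cuB dp du (f + 1) n memo).1 = cuA dp du (f + 1) n ∧
        GoodMemo dp du (cuB dp du (f + 1) n memo).2 := by
  intro f
  induction f with
  | zero =>
    intro n memo hs hg
    cases hm : memo.get? n with
    | some v =>
      obtain ⟨g, hgs, hgv⟩ := hg n v hm
      exact ⟨by simp [cuB, hm, memo_value_eq dp du 0 g n v hs hgs hgv], by simpa [cuB, hm] using hg⟩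
    | none =>
      cases hdp : (PySem.Dict.mk dp).get? n with
      | none =>
        refine ⟨by simp [cuB, cuA, hm, hdp], ?_⟩
        simp only [cuB, hm, hdp]
        exact goodMemo_insert dp du memo n [[]] 0 hg hs (by simp [cuA, hdp])
      | some prevs =>
        cases hdu : (PySem.Dict.mk du).get? n with
        | some v =>
          refine ⟨by simp [cuB, cuA, hm, hdp, hdu], ?_⟩
          simp only [cuB, hm, hdp, hdu]
          exact goodMemo_insert dp du memo n v 0 hg hs (by simp [cuA, hdp, hdu])
        | none =>
          have hprevs : prevs = [] := by
            unfold Safe at hs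
            rw [Function.iterate_succ_apply, Function.iterate_zero_apply] at hs
            simpa [upStep, upChildren, hdp, hdu] using hs
          subst hprevs
          refine ⟨by simp [cuB, cuBL, cuA, hm, hdp, hdu], ?_⟩
          simp only [cuB, cuBL, hm, hdp, hdu]
          exact goodMemo_insert dp du memo n [] 0 hg hs (by simp [cuA, hdp, hdu])
  | succ f ih =>
    intro n memo hs hg
    cases hm : memo.get? n with
    | some v =>
      obtain ⟨g, hgs, hgv⟩ := hg n v hm
      exact ⟨by simp [cuB, hm, memo_value_eq dp du (f + 1) g n v hs hgs hgv],
             by simpa [cuB, hm] using hg⟩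
    | none =>
      cases hdp : (PySem.Dict.mk dp).get? n with
      | none =>
        refine ⟨by simp [cuB, cuA, hm, hdp], ?_⟩
        simp only [cuB, hm, hdp]
        exact goodMemo_insert dp du memo n [[]] 0 hg
          (by simp [Safe, upStep, upChildren, hdp])
          (by simp [cuA, hdp])
      | some prevs =>
        cases hdu : (PySem.Dict.mk du).get? n with
        | some v =>
          refine ⟨by simp [cuB, cuA, hm, hdp, hdu], ?_⟩
          simp only [cuB, hm, hdp, hdu]
          exact goodMemo_insert dp du memo n v 0 hg
            (by simp [Safe, upStep, upChildren, hdp, hdu])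
            (by simp [cuA, hdp, hdu])
        | none =>
          -- the list loop
          have hloop : ∀ (l : List Int) (m : PySem.Dict Int (List (List Int))),
              (∀ p ∈ l, Safe dp du (f + 1) p) → GoodMemo dp du m →
              (cuBL dp du (f + 1) l m).1 =
                l.flatMap (fun p => (cuA dp du (f + 1) p).map (fun r => p :: r)) ∧
              GoodMemo dp du (cuBL dp du (f + 1) l m).2 := by
            intro l
            induction l with
            | nil => intro m _ hgm; exact ⟨by simp [cuBL], by simpa [cuBL] using hgm⟩
            | cons p rest ihl =>
              intro m hsl hgm
              obtain ⟨h1, h2⟩ := ih p m (hsl p (by simp)) hgm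
              obtain ⟨h3, h4⟩ := ihl (cuB dp du (f + 1) p m).2
                (fun q hq => hsl q (by simp [hq])) h2
              constructor
              · simp only [cuBL, List.flatMap_cons]
                rw [← h1, ← h3]
              · simpa only [cuBL] using h4
          have hsl : ∀ p ∈ prevs, Safe dp du (f + 1) p :=
            fun p hp => safe_prev dp du (f + 1) n p prevs hdp hdu hs hp
          obtain ⟨h1, h2⟩ := hloop prevs memo hsl hg
          constructor
          · simp only [cuB, hm, hdp, hdu]
            rw [h1]
            show _ = cuA dp du (f + 1 + 1) n
            simp only [cuA, hdp, hdu]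
            rw [PySem.List.foldl_append_eq_flatMap]
            simp
          · simp only [cuB, hm, hdp, hdu]
            apply goodMemo_insert dp du _ n _ (f + 1) h2 hs
            rw [h1]
            show _ = cuA dp du (f + 1 + 1) n
            simp only [cuA, hdp, hdu]
            rw [PySem.List.foldl_append_eq_flatMap]
            simp

lemma goodMemo_empty (dp : List (Int × List Int)) (du : List (Int × List (List Int))) :
    GoodMemo dp du PySem.Dict.empty := by
  intro k v hk
  simp [PySem.Dict.get?_empty] at hk

-- ===== VERDICT (by name: the statement is the Claim_ definition above) =====
theorem compute_upstream_spec : Claim_equal_compute_upstream := by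
  intro source dp du _ hpre
  unfold Spec_compute_upstream compute_upstream compute_upstream_alt
  exact ((cuB_correct dp du dp.length source PySem.Dict.empty hpre
    (goodMemo_empty dp du)).1).symm
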